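-- pv_equiv track=rewrite | github.com/ilemhadri/PERT | PERT.py | start_time
-- ===== SOURCE A (Python) =====
-- parents = {
--     1:[],
--     2:[1],
--     3:[1],
--     4:[2],
--     5:[2],
--     6:[3],
--     7:[3],
--     8:[3],
--     9:[5,6,7],
--     10:[4,8,9]
-- }
--
-- def start_time(node, durations):
--     # Recursive function to compute the start time for a given node
--     # Returns:
-- #         - the start time for the node
-- #         - the critical path in the node up to the node
--     p = parents[node]
--     if p==[]:
--         return 0,[node]
--     else:
--         stimes = [(start_time(n,durations),n) for n in p]
--         # nodes are 1-indexed, but durations are 0-indexed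
--         etimes = [(s[0] + durations[n-1],s[1]) for s,n in stimes]
--         time, path = max(etimes, key = lambda x:x[0])
--         return time, path+[node]
-- ===== SOURCE B (Python) =====
-- parents = {
--     1:[],
--     2:[1],
--     3:[1],
--     4:[2],
--     5:[2],
--     6:[3],
--     7:[3],
--     8:[3],
--     9:[5,6,7],
--     10:[4,8,9]
-- }
--
-- def start_time(node, durations):
--     # Bottom-up dynamic programming: compute every node 1..node once,
--     # in topological (numeric) order, instead of re-expanding shared
--     # ancestors recursively.
--     st = {}
--     for k in range(1, node + 1):
--         best = None
--         for p in parents[k]: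
--             t, path = st[p]
--             c = t + durations[p - 1]
--             if best is None or c > best[0]:
--                 best = (c, path)
--         st[k] = (0, [k]) if best is None else (best[0], best[1] + [k])
--     return st[node]
-- ===== Notes on version B (the rewrite author's own statement) =====
-- stated objective: faster
-- what changed: Replaces the naive top-down recursion (which re-expands shared ancestors like nodes 3 and 9) by a bottom-up dynamic program that fills a dict of (start_time, path) for nodes 1..node in topological (numeric) order, computing each node once.
import Mathlib
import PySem

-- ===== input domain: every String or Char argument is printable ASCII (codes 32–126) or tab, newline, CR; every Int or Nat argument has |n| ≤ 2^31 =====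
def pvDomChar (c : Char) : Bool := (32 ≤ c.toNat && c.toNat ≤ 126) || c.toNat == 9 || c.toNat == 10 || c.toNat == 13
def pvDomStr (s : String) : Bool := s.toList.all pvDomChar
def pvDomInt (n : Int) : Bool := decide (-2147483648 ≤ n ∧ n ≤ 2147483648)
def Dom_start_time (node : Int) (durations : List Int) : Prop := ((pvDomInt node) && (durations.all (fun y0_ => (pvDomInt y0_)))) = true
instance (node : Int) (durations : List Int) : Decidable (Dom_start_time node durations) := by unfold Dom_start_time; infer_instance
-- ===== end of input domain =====

-- B replaces A's naive top-down recursion over the fixed DAG by a bottom-up dynamic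
-- program (dict filled for nodes 1..node in numeric topological order, each node once).


-- ===== PORT A =====
-- the module-level dict `parents` (keys 1..10; other keys raise KeyError in Python,
-- excluded by Pre_; here the table returns [] outside 1..10)
def pvParents (n : Nat) : List Nat :=
  match n with
  | 1 => [] | 2 => [1] | 3 => [1] | 4 => [2] | 5 => [2]
  | 6 => [3] | 7 => [3] | 8 => [3] | 9 => [5, 6, 7] | 10 => [4, 8, 9]
  | _ => []

theorem pvParents_lt {m n : Nat} (h : m ∈ pvParents n) : m < n := by
  unfold pvParents at h
  split at h <;> simp_all <;> omega

-- literal port of A's recursion (well-founded on the node number: parents are smaller)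
def pvStA (n : Nat) (d : List Int) : Int × List Int :=
  let p := pvParents n
  if p = [] then (0, [(n : Int)])
  else
    let stimes := p.attach.map (fun m => (pvStA m.1 d, m.1))
    let etimes := stimes.map (fun sm => (sm.1.1 + (PySem.List.pyGet? d ((sm.2 : Int) - 1)).getD 0, sm.1.2))
    -- Python's max over a nonempty list; the none branch is unreachable (p ≠ [])
    match PySem.List.max? etimes (fun x => x.1) with
    | some tp => (tp.1, tp.2 ++ [(n : Int)])
    | none => (0, [(n : Int)])
decreasing_by exact pvParents_lt m.2

def start_time (node : Int) (durations : List Int) : Int × List Int :=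
  pvStA node.toNat durations

-- ===== PORT B =====
-- B's loop body: compute node k's (start time, path) from the already-filled dict
def pvStep (d : List Int) (st : PySem.Dict Int (Int × List Int)) (k : Int) :
    PySem.Dict Int (Int × List Int) :=
  let best := ((pvParents k.toNat).map (fun m => (m : Int))).foldl
    (fun best p =>
      let tp := (st.get? p).getD (0, [])
      let c := tp.1 + (PySem.List.pyGet? d (p - 1)).getD 0
      match best with
      | none => some (c, tp.2)
      | some b => if c > b.1 then some (c, tp.2) else some b) none
  match best with
  | none => st.insert k (0, [k])
  | some b => st.insert k (b.1, b.2 ++ [k])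

def start_time_alt (node : Int) (durations : List Int) : Int × List Int :=
  let st := (PySem.List.pyRange 1 (node + 1) 1).foldl (pvStep durations) PySem.Dict.empty
  (st.get? node).getD (0, [])

-- ===== PRECONDITION & SPEC =====
-- minimal durations length A's recursion indexes for each node (exact: shorter raises IndexError)
def pvNeed (node : Int) : Nat :=
  if node ≤ 1 then 0 else if node ≤ 3 then 1 else if node ≤ 5 then 2
  else if node ≤ 8 then 3 else if node ≤ 9 then 7 else 9

-- exactly the inputs on which Python A returns: node a key of `parents` (else KeyError)
-- and durations long enough for every index the recursion reads (else IndexError)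
def Pre_start_time (node : Int) (durations : List Int) : Prop :=
  1 ≤ node ∧ node ≤ 10 ∧ pvNeed node ≤ durations.length
instance (node : Int) (durations : List Int) : Decidable (Pre_start_time node durations) := by
  unfold Pre_start_time; infer_instance

def pvWitness_start_time : Int × List Int := (10, [10, 20, 30, 40, 50, 60, 70, 80, 90])

def Spec_start_time (node : Int) (durations : List Int) (out : Int × List Int) : Prop :=
  out = start_time_alt node durations
instance (node : Int) (durations : List Int) (out : Int × List Int) :
    Decidable (Spec_start_time node durations out) := by unfold Spec_start_time; infer_instance

-- ===== CLAIM (what is proved, stated in full; the proofs are below) =====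
def Claim_equal_start_time : Prop := ∀ (node : Int) (durations : List Int),
  Dom_start_time node durations → Pre_start_time node durations →
  Spec_start_time node durations (start_time node durations)

-- ===== LEMMAS AND PROOFS =====
-- proof-layer helpers: the closed-form value of each node (shared characterisation of both ports)
def pvG (d : List Int) (i : Int) : Int := (PySem.List.pyGet? d i).getD 0

def pvE1 (_d : List Int) : Int × List Int := (0, [1])
def pvE2 (d : List Int) : Int × List Int := (pvG d 0, [1, 2])
def pvE3 (d : List Int) : Int × List Int := (pvG d 0, [1, 3])
def pvE4 (d : List Int) : Int × List Int := (pvG d 0 + pvG d 1, [1, 2, 4])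
def pvE5 (d : List Int) : Int × List Int := (pvG d 0 + pvG d 1, [1, 2, 5])
def pvE6 (d : List Int) : Int × List Int := (pvG d 0 + pvG d 2, [1, 3, 6])
def pvE7 (d : List Int) : Int × List Int := (pvG d 0 + pvG d 2, [1, 3, 7])
def pvE8 (d : List Int) : Int × List Int := (pvG d 0 + pvG d 2, [1, 3, 8])
def pvE9 (d : List Int) : Int × List Int :=
  let a := pvG d 0 + pvG d 1 + pvG d 4
  let b := pvG d 0 + pvG d 2 + pvG d 5
  let c := pvG d 0 + pvG d 2 + pvG d 6
  let m := if a < b then (b, ([1, 3, 6] : List Int)) else (a, [1, 2, 5])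
  let m2 := if m.1 < c then (c, ([1, 3, 7] : List Int)) else m
  (m2.1, m2.2 ++ [9])
def pvE10 (d : List Int) : Int × List Int :=
  let a := (pvE4 d).1 + pvG d 3
  let b := (pvE8 d).1 + pvG d 7
  let c := (pvE9 d).1 + pvG d 8
  let m := if a < b then (b, ([1, 3, 8] : List Int)) else (a, [1, 2, 4])
  let m2 := if m.1 < c then (c, (pvE9 d).2) else m
  (m2.1, m2.2 ++ [10])


lemma pvA1 (d : List Int) : pvStA 1 d = pvE1 d := by
  rw [pvStA.eq_def]
  simp [pvParents, pvE1]
lemma pvA2 (d : List Int) : pvStA 2 d = pvE2 d := by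
  rw [pvStA.eq_def]
  simp [pvParents, pvA1, pvE1, pvE2, pvG, PySem.List.max?]
lemma pvA3 (d : List Int) : pvStA 3 d = pvE3 d := by
  rw [pvStA.eq_def]
  simp [pvParents, pvA1, pvE1, pvE3, pvG, PySem.List.max?]
lemma pvA4 (d : List Int) : pvStA 4 d = pvE4 d := by
  rw [pvStA.eq_def]
  simp [pvParents, pvA2, pvE2, pvE4, pvG, PySem.List.max?]
lemma pvA5 (d : List Int) : pvStA 5 d = pvE5 d := by
  rw [pvStA.eq_def]
  simp [pvParents, pvA2, pvE2, pvE5, pvG, PySem.List.max?]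
lemma pvA6 (d : List Int) : pvStA 6 d = pvE6 d := by
  rw [pvStA.eq_def]
  simp [pvParents, pvA3, pvE3, pvE6, pvG, PySem.List.max?]
lemma pvA7 (d : List Int) : pvStA 7 d = pvE7 d := by
  rw [pvStA.eq_def]
  simp [pvParents, pvA3, pvE3, pvE7, pvG, PySem.List.max?]
lemma pvA8 (d : List Int) : pvStA 8 d = pvE8 d := by
  rw [pvStA.eq_def]
  simp [pvParents, pvA3, pvE3, pvE8, pvG, PySem.List.max?]
lemma pvA9 (d : List Int) : pvStA 9 d = pvE9 d := by
  rw [pvStA.eq_def]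
  simp [pvParents, pvA5, pvA6, pvA7, pvE5, pvE6, pvE7, pvE9, pvG, PySem.List.max?]
  split_ifs <;> simp_all <;> split_ifs <;> simp_all <;> omega
lemma pvA10 (d : List Int) : pvStA 10 d = pvE10 d := by
  rw [pvStA.eq_def]
  simp [pvParents, pvA4, pvA8, pvA9, pvE10, pvG, PySem.List.max?]
  split_ifs <;> simp_all [pvE4, pvE8, pvG] <;>
    first
      | omega
      | (rw [if_neg (by omega)]; simp)

lemma pvB1 (d : List Int) : pvStep d PySem.Dict.empty 1 = PySem.Dict.mk [(1, pvE1 d)] := by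
  simp [pvStep, pvParents, pvE1, PySem.Dict.empty, PySem.Dict.insert, PySem.Dict.contains]

lemma pvB2 (d : List Int) : pvStep d (PySem.Dict.mk [(1, pvE1 d)]) 2 = PySem.Dict.mk [(1, pvE1 d), (2, pvE2 d)] := by
  simp [pvStep, pvParents, pvE1, pvE2, pvG, PySem.Dict.insert, PySem.Dict.contains, PySem.Dict.get?]

lemma pvB3 (d : List Int) : pvStep d (PySem.Dict.mk [(1, pvE1 d), (2, pvE2 d)]) 3 = PySem.Dict.mk [(1, pvE1 d), (2, pvE2 d), (3, pvE3 d)] := by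
  simp [pvStep, pvParents, pvE1, pvE2, pvE3, pvG, PySem.Dict.insert, PySem.Dict.contains, PySem.Dict.get?]

lemma pvB4 (d : List Int) : pvStep d (PySem.Dict.mk [(1, pvE1 d), (2, pvE2 d), (3, pvE3 d)]) 4 = PySem.Dict.mk [(1, pvE1 d), (2, pvE2 d), (3, pvE3 d), (4, pvE4 d)] := by
  simp [pvStep, pvParents, pvE1, pvE2, pvE3, pvE4, pvG, PySem.Dict.insert, PySem.Dict.contains, PySem.Dict.get?]

lemma pvB5 (d : List Int) : pvStep d (PySem.Dict.mk [(1, pvE1 d), (2, pvE2 d), (3, pvE3 d), (4, pvE4 d)]) 5 = PySem.Dict.mk [(1, pvE1 d), (2, pvE2 d), (3, pvE3 d), (4, pvE4 d), (5, pvE5 d)] := by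
  simp [pvStep, pvParents, pvE1, pvE2, pvE3, pvE4, pvE5, pvG, PySem.Dict.insert, PySem.Dict.contains, PySem.Dict.get?]

lemma pvB6 (d : List Int) : pvStep d (PySem.Dict.mk [(1, pvE1 d), (2, pvE2 d), (3, pvE3 d), (4, pvE4 d), (5, pvE5 d)]) 6 = PySem.Dict.mk [(1, pvE1 d), (2, pvE2 d), (3, pvE3 d), (4, pvE4 d), (5, pvE5 d), (6, pvE6 d)] := by
  simp [pvStep, pvParents, pvE1, pvE2, pvE3, pvE4, pvE5, pvE6, pvG, PySem.Dict.insert, PySem.Dict.contains, PySem.Dict.get?]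

lemma pvB7 (d : List Int) : pvStep d (PySem.Dict.mk [(1, pvE1 d), (2, pvE2 d), (3, pvE3 d), (4, pvE4 d), (5, pvE5 d), (6, pvE6 d)]) 7 = PySem.Dict.mk [(1, pvE1 d), (2, pvE2 d), (3, pvE3 d), (4, pvE4 d), (5, pvE5 d), (6, pvE6 d), (7, pvE7 d)] := by
  simp [pvStep, pvParents, pvE1, pvE2, pvE3, pvE4, pvE5, pvE6, pvE7, pvG, PySem.Dict.insert, PySem.Dict.contains, PySem.Dict.get?]

lemma pvB8 (d : List Int) : pvStep d (PySem.Dict.mk [(1, pvE1 d), (2, pvE2 d), (3, pvE3 d), (4, pvE4 d), (5, pvE5 d), (6, pvE6 d), (7, pvE7 d)]) 8 = PySem.Dict.mk [(1, pvE1 d), (2, pvE2 d), (3, pvE3 d), (4, pvE4 d), (5, pvE5 d), (6, pvE6 d), (7, pvE7 d), (8, pvE8 d)] := by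
  simp [pvStep, pvParents, pvE1, pvE2, pvE3, pvE4, pvE5, pvE6, pvE7, pvE8, pvG, PySem.Dict.insert, PySem.Dict.contains, PySem.Dict.get?]

lemma pvB9 (d : List Int) : pvStep d (PySem.Dict.mk [(1, pvE1 d), (2, pvE2 d), (3, pvE3 d), (4, pvE4 d), (5, pvE5 d), (6, pvE6 d), (7, pvE7 d), (8, pvE8 d)]) 9 = PySem.Dict.mk [(1, pvE1 d), (2, pvE2 d), (3, pvE3 d), (4, pvE4 d), (5, pvE5 d), (6, pvE6 d), (7, pvE7 d), (8, pvE8 d), (9, pvE9 d)] := by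
  simp [pvStep, pvParents, pvE5, pvE6, pvE7, pvE9, pvG, PySem.Dict.insert, PySem.Dict.contains, PySem.Dict.get?]
  split_ifs <;> simp_all <;> split_ifs <;> simp_all <;> omega

lemma pvB10 (d : List Int) : pvStep d (PySem.Dict.mk [(1, pvE1 d), (2, pvE2 d), (3, pvE3 d), (4, pvE4 d), (5, pvE5 d), (6, pvE6 d), (7, pvE7 d), (8, pvE8 d), (9, pvE9 d)]) 10 = PySem.Dict.mk [(1, pvE1 d), (2, pvE2 d), (3, pvE3 d), (4, pvE4 d), (5, pvE5 d), (6, pvE6 d), (7, pvE7 d), (8, pvE8 d), (9, pvE9 d), (10, pvE10 d)] := by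
  simp [pvStep, pvParents, pvE10, pvG, PySem.Dict.insert, PySem.Dict.contains, PySem.Dict.get?]
  split_ifs <;> simp_all [pvE4, pvE8, pvG] <;>
    first
      | omega
      | (rw [if_neg (by omega)]; simp)

lemma pvAlt1 (d : List Int) : start_time_alt 1 d = pvE1 d := by
  have hr : PySem.List.pyRange 1 2 1 = [1] := by decide
  simp [start_time_alt, hr, pvB1, PySem.Dict.get?]

lemma pvAlt2 (d : List Int) : start_time_alt 2 d = pvE2 d := by
  have hr : PySem.List.pyRange 1 3 1 = [1, 2] := by decide
  simp [start_time_alt, hr, pvB1, pvB2, PySem.Dict.get?]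

lemma pvAlt3 (d : List Int) : start_time_alt 3 d = pvE3 d := by
  have hr : PySem.List.pyRange 1 4 1 = [1, 2, 3] := by decide
  simp [start_time_alt, hr, pvB1, pvB2, pvB3, PySem.Dict.get?]

lemma pvAlt4 (d : List Int) : start_time_alt 4 d = pvE4 d := by
  have hr : PySem.List.pyRange 1 5 1 = [1, 2, 3, 4] := by decide
  simp [start_time_alt, hr, pvB1, pvB2, pvB3, pvB4, PySem.Dict.get?]

lemma pvAlt5 (d : List Int) : start_time_alt 5 d = pvE5 d := by
  have hr : PySem.List.pyRange 1 6 1 = [1, 2, 3, 4, 5] := by decide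
  simp [start_time_alt, hr, pvB1, pvB2, pvB3, pvB4, pvB5, PySem.Dict.get?]

lemma pvAlt6 (d : List Int) : start_time_alt 6 d = pvE6 d := by
  have hr : PySem.List.pyRange 1 7 1 = [1, 2, 3, 4, 5, 6] := by decide
  simp [start_time_alt, hr, pvB1, pvB2, pvB3, pvB4, pvB5, pvB6, PySem.Dict.get?]

lemma pvAlt7 (d : List Int) : start_time_alt 7 d = pvE7 d := by
  have hr : PySem.List.pyRange 1 8 1 = [1, 2, 3, 4, 5, 6, 7] := by decide
  simp [start_time_alt, hr, pvB1, pvB2, pvB3, pvB4, pvB5, pvB6, pvB7, PySem.Dict.get?]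

lemma pvAlt8 (d : List Int) : start_time_alt 8 d = pvE8 d := by
  have hr : PySem.List.pyRange 1 9 1 = [1, 2, 3, 4, 5, 6, 7, 8] := by decide
  simp [start_time_alt, hr, pvB1, pvB2, pvB3, pvB4, pvB5, pvB6, pvB7, pvB8, PySem.Dict.get?]

lemma pvAlt9 (d : List Int) : start_time_alt 9 d = pvE9 d := by
  have hr : PySem.List.pyRange 1 10 1 = [1, 2, 3, 4, 5, 6, 7, 8, 9] := by decide
  simp [start_time_alt, hr, pvB1, pvB2, pvB3, pvB4, pvB5, pvB6, pvB7, pvB8, pvB9, PySem.Dict.get?]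

lemma pvAlt10 (d : List Int) : start_time_alt 10 d = pvE10 d := by
  have hr : PySem.List.pyRange 1 11 1 = [1, 2, 3, 4, 5, 6, 7, 8, 9, 10] := by decide
  simp [start_time_alt, hr, pvB1, pvB2, pvB3, pvB4, pvB5, pvB6, pvB7, pvB8, pvB9, pvB10, PySem.Dict.get?]

-- ===== VERDICT (by name: the statement is the Claim_ definition above) =====
theorem start_time_spec : Claim_equal_start_time := by
  intro node durations _hdom hpre
  unfold Spec_start_time
  obtain ⟨h1, h2, -⟩ := hpre
  interval_cases node
  · rw [pvAlt1]; show pvStA 1 durations = _; rw [pvA1]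
  · rw [pvAlt2]; show pvStA 2 durations = _; rw [pvA2]
  · rw [pvAlt3]; show pvStA 3 durations = _; rw [pvA3]
  · rw [pvAlt4]; show pvStA 4 durations = _; rw [pvA4]
  · rw [pvAlt5]; show pvStA 5 durations = _; rw [pvA5]
  · rw [pvAlt6]; show pvStA 6 durations = _; rw [pvA6]
  · rw [pvAlt7]; show pvStA 7 durations = _; rw [pvA7]
  · rw [pvAlt8]; show pvStA 8 durations = _; rw [pvA8]
  · rw [pvAlt9]; show pvStA 9 durations = _; rw [pvA9]
  · rw [pvAlt10]; show pvStA 10 durations = _; rw [pvA10]
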